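-- pv_equiv track=rewrite | github.com/ekansh-arora0/payguard-public | payguard_unified.py | _requires_repeat_confirmation
-- ===== SOURCE A (Python) =====
-- def _requires_repeat_confirmation(deduped):
--     """Only require repeat confirmation for very low confidence findings."""
--     if any(cat in {'URL_REPUTATION', 'TEXT_SCAM', 'TEXT_ANALYSIS'} for cat, _, _ in deduped):
--         return False
--     if any(cat == 'HTML_PHISHING' and conf >= 50 for cat, _, conf in deduped):
--         return False
--     if any(conf >= 60 for _, _, conf in deduped):
--         return False
--     if len({cat for cat, _, _ in deduped}) >= 2:
--         return False
--     return True
--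
--     return True
-- ===== SOURCE B (Python) =====
-- def _requires_repeat_confirmation(deduped):
--     """Only require repeat confirmation for very low confidence findings."""
--     if not deduped:
--         return True
--     first_cat = deduped[0][0]
--     for cat, _, conf in deduped:
--         if cat in ('URL_REPUTATION', 'TEXT_SCAM', 'TEXT_ANALYSIS'):
--             return False
--         if cat == 'HTML_PHISHING' and conf >= 50:
--             return False
--         if conf >= 60:
--             return False
--         if cat != first_cat:
--             return False
--     return True
-- ===== Notes on version B (the rewrite author's own statement) =====
-- stated objective: simpler
-- what changed: Drops the category set entirely: instead of four staged full scans plus a set-cardinality test, B makes one early-exiting pass and decides 'at least two distinct categories' by comparing each category to the first element's category (O(1) extra space, returns at the first disqualifying finding).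
import Mathlib
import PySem

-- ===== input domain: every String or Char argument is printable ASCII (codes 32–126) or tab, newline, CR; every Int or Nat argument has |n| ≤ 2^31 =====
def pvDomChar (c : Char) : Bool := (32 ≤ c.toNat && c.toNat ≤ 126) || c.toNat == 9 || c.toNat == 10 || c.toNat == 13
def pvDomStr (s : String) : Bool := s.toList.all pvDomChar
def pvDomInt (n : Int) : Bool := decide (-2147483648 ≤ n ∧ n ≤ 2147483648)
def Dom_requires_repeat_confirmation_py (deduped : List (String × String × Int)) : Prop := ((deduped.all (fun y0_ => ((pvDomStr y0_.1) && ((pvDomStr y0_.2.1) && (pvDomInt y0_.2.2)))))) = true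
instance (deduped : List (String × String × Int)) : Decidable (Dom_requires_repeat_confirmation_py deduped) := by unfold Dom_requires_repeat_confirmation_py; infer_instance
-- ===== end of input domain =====

-- B replaces A's four staged scans + category set by one early-exiting pass that
-- compares each category against the first element's category; objective: simpler.

-- ===== PORT A =====
def requires_repeat_confirmation_py (deduped : List (String × String × Int)) : Bool :=
  if deduped.any (fun t => t.1 == "URL_REPUTATION" || t.1 == "TEXT_SCAM" || t.1 == "TEXT_ANALYSIS") then
    false
  else if deduped.any (fun t => t.1 == "HTML_PHISHING" && decide (t.2.2 ≥ 50)) then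
    false
  else if deduped.any (fun t => decide (t.2.2 ≥ 60)) then
    false
  else if (PySem.Set.ofList (deduped.map (fun t => t.1))).length ≥ 2 then
    false
  else
    true

-- ===== PORT B =====
-- the early-exiting for-loop of Source B (return False on a hit, True when exhausted)
def pvLoop (firstCat : String) : List (String × String × Int) → Bool
  | [] => true
  | t :: rest =>
    if t.1 == "URL_REPUTATION" || t.1 == "TEXT_SCAM" || t.1 == "TEXT_ANALYSIS" then false
    else if t.1 == "HTML_PHISHING" && decide (t.2.2 ≥ 50) then false
    else if decide (t.2.2 ≥ 60) then false
    else if t.1 != firstCat then false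
    else pvLoop firstCat rest

def requires_repeat_confirmation_py_alt (deduped : List (String × String × Int)) : Bool :=
  match deduped with
  | [] => true
  | h :: _ => pvLoop h.1 deduped

-- ===== PRECONDITION & SPEC =====
def Spec_requires_repeat_confirmation_py (deduped : List (String × String × Int)) (out : Bool) : Prop := out = requires_repeat_confirmation_py_alt deduped
instance (deduped : List (String × String × Int)) (out : Bool) : Decidable (Spec_requires_repeat_confirmation_py deduped out) := by unfold Spec_requires_repeat_confirmation_py; infer_instance

-- ===== CLAIM =====
def Claim_equal_requires_repeat_confirmation_py : Prop := ∀ (deduped : List (String × String × Int)), Dom_requires_repeat_confirmation_py deduped → Spec_requires_repeat_confirmation_py deduped (requires_repeat_confirmation_py deduped)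

-- ===== LEMMAS AND PROOFS =====

-- the per-element disqualifying condition (disjunction of A's three scan predicates)
def pvCond (t : String × String × Int) : Bool :=
  (t.1 == "URL_REPUTATION" || t.1 == "TEXT_SCAM" || t.1 == "TEXT_ANALYSIS")
  || (t.1 == "HTML_PHISHING" && decide (t.2.2 ≥ 50))
  || decide (t.2.2 ≥ 60)

theorem pvLoop_char (c : String) (l : List (String × String × Int)) :
    pvLoop c l = (!l.any pvCond && l.all (fun t => t.1 == c)) := by
  induction l with
  | nil => rfl
  | cons h tl ih =>
    simp only [pvLoop, ih, List.any_cons, List.all_cons, pvCond]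
    cases h1 : h.1 == "URL_REPUTATION" || h.1 == "TEXT_SCAM" || h.1 == "TEXT_ANALYSIS" <;>
      cases h2 : h.1 == "HTML_PHISHING" && decide (h.2.2 ≥ 50) <;>
      cases h3 : decide (h.2.2 ≥ 60) <;>
      cases h4 : h.1 == c <;> simp [h4, bne]

theorem pv_any_split (l : List (String × String × Int)) :
    l.any pvCond
    = (l.any (fun t => t.1 == "URL_REPUTATION" || t.1 == "TEXT_SCAM" || t.1 == "TEXT_ANALYSIS")
       || l.any (fun t => t.1 == "HTML_PHISHING" && decide (t.2.2 ≥ 50))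
       || l.any (fun t => decide (t.2.2 ≥ 60))) := by
  induction l with
  | nil => rfl
  | cons h tl ih =>
    simp only [List.any_cons, ih, pvCond]
    cases h.1 == "URL_REPUTATION" || h.1 == "TEXT_SCAM" || h.1 == "TEXT_ANALYSIS" <;>
      cases h.1 == "HTML_PHISHING" && decide (h.2.2 ≥ 50) <;>
      cases decide (h.2.2 ≥ 60) <;> simp

theorem pv_foldl_add_len_mono (xs : List String) (s : PySem.Set String) :
    s.length ≤ (xs.foldl PySem.Set.add s).length := by
  induction xs generalizing s with
  | nil => simp
  | cons x xs ih =>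
    refine le_trans ?_ (ih (PySem.Set.add s x))
    simp only [PySem.Set.add]
    split <;> simp

-- |set(a :: xs)| <= 1 iff every element of xs equals a
theorem pv_foldl_le_one (xs : List String) (a : String) :
    ((xs.foldl PySem.Set.add [a]).length ≤ 1) ↔ xs.all (fun x => x == a) := by
  induction xs with
  | nil => simp
  | cons x xs ih =>
    simp only [List.foldl_cons, List.all_cons]
    by_cases hx : x = a
    · subst hx
      have hadd : PySem.Set.add [x] x = [x] := by simp [PySem.Set.add, PySem.Set.contains]
      rw [hadd]
      simpa using ih
    · have hadd : PySem.Set.add [a] x = [a, x] := by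
        simp [PySem.Set.add, PySem.Set.contains, hx]
      rw [hadd]
      have hm := pv_foldl_add_len_mono xs [a, x]
      simp only [List.length_cons, List.length_nil] at hm
      constructor
      · intro hle; omega
      · intro hall; simp [hx] at hall

theorem pv_set_le_one (a : String) (xs : List String) :
    ((PySem.Set.ofList (a :: xs)).length ≤ 1) ↔ xs.all (fun x => x == a) := by
  have h : PySem.Set.ofList (a :: xs) = xs.foldl PySem.Set.add [a] := by
    rw [PySem.Set.ofList_eq_foldl]; rfl
  rw [h]; exact pv_foldl_le_one xs a

-- ===== VERDICT =====
theorem requires_repeat_confirmation_py_spec : Claim_equal_requires_repeat_confirmation_py := by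
  intro deduped _
  unfold Spec_requires_repeat_confirmation_py
  cases deduped with
  | nil => decide
  | cons h tl =>
    have halt : requires_repeat_confirmation_py_alt (h :: tl) = pvLoop h.1 (h :: tl) := rfl
    rw [halt, pvLoop_char]
    unfold requires_repeat_confirmation_py
    have hsplit := pv_any_split (h :: tl)
    have hset := pv_set_le_one h.1 (tl.map (fun t => t.1))
    simp only [List.map_cons] at *
    by_cases h4 : (PySem.Set.ofList (h.1 :: tl.map fun t => t.1)).length ≥ 2
    · have hne : ¬ (tl.all (fun t => t.1 == h.1)) = true := by
        intro hall
        have hm : (tl.map (fun t => t.1)).all (fun x => x == h.1) = true := by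
          simp only [List.all_map]; exact hall
        have := hset.mpr hm
        omega
      cases e1 : (h :: tl).any (fun t => t.1 == "URL_REPUTATION" || t.1 == "TEXT_SCAM" || t.1 == "TEXT_ANALYSIS") <;>
        cases e2 : (h :: tl).any (fun t => t.1 == "HTML_PHISHING" && decide (t.2.2 ≥ 50)) <;>
        cases e3 : (h :: tl).any (fun t => decide (t.2.2 ≥ 60)) <;>
        simp [e1, e2, e3, h4, hsplit, hne, List.all_cons]
    · have hle : (PySem.Set.ofList (h.1 :: tl.map fun t => t.1)).length ≤ 1 := by omega
      have hall : (tl.map (fun t => t.1)).all (fun x => x == h.1) = true := hset.mp hle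
      have hall' : tl.all (fun t => t.1 == h.1) = true := by
        simpa [List.all_map] using hall
      cases e1 : (h :: tl).any (fun t => t.1 == "URL_REPUTATION" || t.1 == "TEXT_SCAM" || t.1 == "TEXT_ANALYSIS") <;>
        cases e2 : (h :: tl).any (fun t => t.1 == "HTML_PHISHING" && decide (t.2.2 ≥ 50)) <;>
        cases e3 : (h :: tl).any (fun t => decide (t.2.2 ≥ 60)) <;>
        simp [e1, e2, e3, h4, hsplit, hall', List.all_cons]
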